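-- pv_equiv track=rewrite | github.com/Exaustia/adventofcode | Kapy/2022/day25/day25_p1.py | maxPow5
-- ===== SOURCE A (Python) =====
-- def maxPow5(nb):
--     if nb == 0:
--         return 0
--     else:
--         power = 1
--         i = 0
--         while power <= nb:
--             power *= 5
--             i += 1
--         return i-1
-- ===== SOURCE B (Python) =====
-- def maxPow5(nb):
--     if nb < 1:
--         return 0 if nb == 0 else -1
--     count = 0
--     while nb >= 5:
--         nb //= 5
--         count += 1
--     return count
-- ===== Notes on version B (the rewrite author's own statement) =====
-- stated objective: simpler
-- what changed: B shrinks the dividend by repeated floor division by 5 (counting the divisions) instead of growing an ascending power of 5 compared against nb, with the degenerate nb<1 cases handled up front.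
import Mathlib
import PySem

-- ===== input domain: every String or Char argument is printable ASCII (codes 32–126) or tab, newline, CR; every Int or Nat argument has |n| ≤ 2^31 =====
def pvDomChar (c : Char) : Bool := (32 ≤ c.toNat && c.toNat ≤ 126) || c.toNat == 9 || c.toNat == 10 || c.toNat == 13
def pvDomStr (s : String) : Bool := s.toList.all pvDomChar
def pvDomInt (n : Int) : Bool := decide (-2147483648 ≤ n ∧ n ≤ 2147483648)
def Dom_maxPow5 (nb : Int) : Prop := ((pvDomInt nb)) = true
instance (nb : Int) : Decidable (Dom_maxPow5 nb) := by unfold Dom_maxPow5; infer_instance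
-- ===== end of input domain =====

-- B shrinks the dividend by repeated floor division by 5 instead of growing a power of 5 (simpler decomposition; same cost).

-- ===== PORT A =====
-- A's while loop: power grows by *5, i counts; the 0 < power invariant (true from the start value 1) is carried for termination.
def maxPow5Loop (nb power i : Int) (hp : 0 < power) : Int :=
  if power ≤ nb then maxPow5Loop nb (power * 5) (i + 1) (by positivity) else i - 1
termination_by (nb + 1 - power).toNat
decreasing_by
  have hmul : power < power * 5 := by nlinarith
  omega

def maxPow5 (nb : Int) : Int :=
  if nb = 0 then 0 else maxPow5Loop nb 1 0 one_pos

-- ===== PORT B =====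
-- B's while loop: divide nb by 5 until it drops below 5, counting the divisions.
def maxPow5AltLoop (nb count : Int) : Int :=
  if h : 5 ≤ nb then maxPow5AltLoop (PySem.Int.floordiv nb 5) (count + 1) else count
termination_by nb.toNat
decreasing_by
  have h2 : PySem.Int.floordiv nb 5 = nb / 5 := PySem.Int.floordiv_eq_ediv_of_pos (by norm_num)
  omega

def maxPow5_alt (nb : Int) : Int :=
  if nb < 1 then (if nb = 0 then 0 else -1) else maxPow5AltLoop nb 0

-- ===== PRECONDITION & SPEC =====
def Spec_maxPow5 (nb : Int) (out : Int) : Prop := out = maxPow5_alt nb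
instance (nb : Int) (out : Int) : Decidable (Spec_maxPow5 nb out) := by unfold Spec_maxPow5; infer_instance

-- ===== CLAIM (what is proved, stated in full; the proofs are below) =====
def Claim_equal_maxPow5 : Prop := ∀ (nb : Int), Dom_maxPow5 nb → Spec_maxPow5 nb (maxPow5 nb)

-- ===== LEMMAS AND PROOFS =====

-- Shifting A's loop: running with power p*5 on nb is running with power p on nb // 5.
theorem maxPow5Loop_shift (n : Nat) : ∀ (nb p i : Int) (hp : 0 < p) (hp5 : 0 < p * 5),
    (nb + 1 - p * 5).toNat = n →
    maxPow5Loop nb (p * 5) i hp5 = maxPow5Loop (PySem.Int.floordiv nb 5) p i hp := by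
  induction n using Nat.strong_induction_on with
  | _ n ih =>
    intro nb p i hp hp5 hn
    have hcond : p * 5 ≤ nb ↔ p ≤ PySem.Int.floordiv nb 5 :=
      (PySem.Int.le_floordiv_iff_mul_le (by norm_num)).symm
    conv_lhs => rw [maxPow5Loop]
    conv_rhs => rw [maxPow5Loop]
    by_cases h : p * 5 ≤ nb
    · rw [if_pos h, if_pos (hcond.mp h)]
      have hlt : p * 5 < p * 5 * 5 := by nlinarith
      exact ih (nb + 1 - p * 5 * 5).toNat (by omega) nb (p * 5) (i + 1) hp5 (by positivity) rfl
    · rw [if_neg h, if_neg (fun hc => h (hcond.mpr hc))]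

-- A's loop started at power 1 computes B's loop.
theorem loopA_eq_loopB (n : Nat) : ∀ (nb c : Int), nb.toNat = n → 1 ≤ nb →
    maxPow5Loop nb 1 c one_pos = maxPow5AltLoop nb c := by
  induction n using Nat.strong_induction_on with
  | _ n ih =>
    intro nb c hn h1
    have hdiv : PySem.Int.floordiv nb 5 = nb / 5 := PySem.Int.floordiv_eq_ediv_of_pos (by norm_num)
    conv_lhs => rw [maxPow5Loop]
    rw [if_pos h1]
    rw [maxPow5Loop_shift (nb + 1 - 1 * 5).toNat nb 1 (c + 1) one_pos (by norm_num) rfl]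
    conv_rhs => rw [maxPow5AltLoop]
    by_cases h : 5 ≤ nb
    · rw [dif_pos h, hdiv]
      exact ih (nb / 5).toNat (by omega) (nb / 5) (c + 1) rfl (by omega)
    · rw [dif_neg h]
      have hq0 : nb / 5 = 0 := by omega
      rw [hdiv, hq0, maxPow5Loop, if_neg (by norm_num : ¬ (1 : Int) ≤ 0)]
      ring

-- ===== VERDICT (by name: the statement is the Claim_ definition above) =====
theorem maxPow5_spec : Claim_equal_maxPow5 := by
  intro nb _
  unfold Spec_maxPow5 maxPow5 maxPow5_alt
  by_cases h0 : nb = 0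
  · simp [h0]
  · rw [if_neg h0]
    by_cases hneg : nb < 1
    · rw [if_pos hneg, if_neg h0, maxPow5Loop, if_neg (by omega)]
      norm_num
    · rw [if_neg hneg]
      exact loopA_eq_loopB nb.toNat nb 0 rfl (by omega)
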